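-- pv_equiv track=rewrite | github.com/bibinnahas/leetcode | remove_duplicates_atmost_two.py | atmost_two
-- ===== SOURCE A (Python) =====
-- def atmost_two(nums):
--     count = 1
--     initial_pos = 1
--
--     if not nums:
--         return 0
--
--     for i in range(1, len(nums)):
--         if nums[i] == nums[i - 1]:
--             count += 1
--         else:
--             count = 1
--         if count <= 2:
--             nums[initial_pos] = nums[i]
--             initial_pos += 1
--
--     return nums, initial_pos
-- ===== SOURCE B (Python) =====
-- from itertools import groupby, islice
--
--
-- def atmost_two(nums):
--     if not nums:
--         return 0
--     kept = [k for k, g in groupby(nums) for _ in islice(g, 2)]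
--     pos = len(kept)
--     nums[:pos] = kept
--     return nums, pos
-- ===== Notes on version B (the rewrite author's own statement) =====
-- stated objective: idiomatic
-- what changed: Replaces A's flat index loop with count-reset and per-element writes by an itertools.groupby pass over runs that builds the kept prefix (at most two per run) and splices it in with one slice assignment.
-- outside the precondition, e.g. on atmost_two([]): A returns 0, B returns 0
import Mathlib
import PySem

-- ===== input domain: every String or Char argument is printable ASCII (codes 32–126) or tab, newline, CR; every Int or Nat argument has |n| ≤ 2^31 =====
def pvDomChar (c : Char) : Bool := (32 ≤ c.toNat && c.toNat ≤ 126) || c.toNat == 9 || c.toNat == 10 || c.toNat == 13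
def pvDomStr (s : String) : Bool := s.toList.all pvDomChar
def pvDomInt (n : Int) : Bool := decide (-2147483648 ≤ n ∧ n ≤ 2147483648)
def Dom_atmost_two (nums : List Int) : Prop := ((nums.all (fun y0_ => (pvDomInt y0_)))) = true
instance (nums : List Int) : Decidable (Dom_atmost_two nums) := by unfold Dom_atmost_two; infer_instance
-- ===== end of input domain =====

-- B rewrites A's flat index loop as an itertools.groupby pass over runs plus one slice
-- assignment (idiomatic); both Pythons mutate nums in place identically, equivalence is
-- proved for the returned (list, pos) value.


-- ===== PORT A =====
-- loop body of A's for-loop; state = (nums, count, initial_pos)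
def atwoStep (st : List Int × Int × Int) (i : Int) : List Int × Int × Int :=
  let ns := st.1
  let count := if PySem.List.pyGetD ns i 0 = PySem.List.pyGetD ns (i - 1) 0
               then st.2.1 + 1 else 1
  if count ≤ 2 then
    (PySem.List.pySetD ns st.2.2 (PySem.List.pyGetD ns i 0), count, st.2.2 + 1)
  else (ns, count, st.2.2)

def atmost_two (nums : List Int) : List Int × Int :=
  if nums = [] then ([], 0)   -- Python returns bare 0 here; excluded by Pre_
  else
    let r := (PySem.List.pyRange 1 (nums.length : Int) 1).foldl atwoStep (nums, 1, 1)
    (r.1, r.2.2)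

-- ===== PORT B =====
-- itertools.groupby for a list of ints: (key, group) per maximal run of equal elements
def pyGroupby : List Int → List (Int × List Int)
  | [] => []
  | x :: xs =>
    (x, x :: xs.takeWhile (· == x)) :: pyGroupby (xs.dropWhile (· == x))
termination_by l => l.length
decreasing_by
  simp only [List.length_cons]
  exact Nat.lt_succ_of_le (List.length_dropWhile_le _ _)

def atmost_two_alt (nums : List Int) : List Int × Int :=
  if nums = [] then ([], 0)
  else
    -- [k for k, g in groupby(nums) for _ in islice(g, 2)]
    let kept := (pyGroupby nums).flatMap (fun g => List.replicate (min 2 g.2.length) g.1)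
    let pos := kept.length
    -- nums[:pos] = kept
    (kept ++ nums.drop pos, (pos : Int))

-- ===== PRECONDITION & SPEC =====
-- Pre_ excludes only the empty list, on which A returns the bare int 0 instead of a
-- (list, int) pair, so its value is not of the declared return type.
def Pre_atmost_two (nums : List Int) : Prop := nums ≠ []
instance (nums : List Int) : Decidable (Pre_atmost_two nums) := by unfold Pre_atmost_two; infer_instance
def pvWitness_atmost_two : List Int := [1, 1, 1, 2]

def Spec_atmost_two (nums : List Int) (out : List Int × Int) : Prop := out = atmost_two_alt nums
instance (nums : List Int) (out : List Int × Int) : Decidable (Spec_atmost_two nums out) := by unfold Spec_atmost_two; infer_instance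

-- ===== CLAIM (what is proved, stated in full; the proofs are below) =====
def Claim_equal_atmost_two : Prop := ∀ (nums : List Int), Dom_atmost_two nums → Pre_atmost_two nums → Spec_atmost_two nums (atmost_two nums)

-- ===== LEMMAS AND PROOFS =====

-- pure model of A's scan: (prev, count, rest) ↦ (kept tail, final prev, final count)
def scan2 (prev : Int) (c : Nat) : List Int → List Int × Int × Nat
  | [] => ([], prev, c)
  | x :: xs =>
    if x = prev then
      (if c + 1 ≤ 2 then x :: (scan2 x (c + 1) xs).1 else (scan2 x (c + 1) xs).1,
       (scan2 x (c + 1) xs).2)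
    else
      (x :: (scan2 x 1 xs).1, (scan2 x 1 xs).2)

def keptOf : List Int → List Int
  | [] => []
  | h :: t => h :: (scan2 h 1 t).1

def cntOf : List Int → Nat
  | [] => 1
  | h :: t => (scan2 h 1 t).2.2

theorem scan2_prev (prev : Int) (c : Nat) (l : List Int) :
    (scan2 prev c l).2.1 = (prev :: l).getLast (List.cons_ne_nil _ _) := by
  induction l generalizing prev c with
  | nil => simp [scan2]
  | cons x xs ih =>
    have h2 : (scan2 prev c (x :: xs)).2 =
        (scan2 x (if x = prev then c + 1 else 1) xs).2 := by
      by_cases hx : x = prev <;> simp [scan2, hx]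
    rw [h2, ih, List.getLast_cons (List.cons_ne_nil _ _)]

theorem scan2_len_le (prev : Int) (c : Nat) (l : List Int) :
    (scan2 prev c l).1.length ≤ l.length := by
  induction l generalizing prev c with
  | nil => simp [scan2]
  | cons x xs ih =>
    by_cases hx : x = prev
    · by_cases hc : c + 1 ≤ 2
      · simp only [scan2, if_pos hx, if_pos hc, List.length_cons]
        have := ih x (c + 1); omega
      · simp only [scan2, if_pos hx, if_neg hc, List.length_cons]
        have := ih x (c + 1); omega
    · simp only [scan2, if_neg hx, List.length_cons]
      have := ih x 1; omega

theorem scan2_len_eq (prev : Int) (c : Nat) (l : List Int) :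
    (scan2 prev c l).1.length = l.length → (scan2 prev c l).1 = l := by
  induction l generalizing prev c with
  | nil => simp [scan2]
  | cons x xs ih =>
    by_cases hx : x = prev
    · by_cases hc : c + 1 ≤ 2
      · simp only [scan2, if_pos hx, if_pos hc, List.length_cons]
        intro h
        exact congrArg (x :: ·) (ih x (c + 1) (by omega))
      · simp only [scan2, if_pos hx, if_neg hc, List.length_cons]
        intro h
        exact absurd h (by have := scan2_len_le x (c + 1) xs; omega)
    · simp only [scan2, if_neg hx, List.length_cons]
      intro h
      exact congrArg (x :: ·) (ih x 1 (by omega))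

theorem keptOf_len_le (l : List Int) : (keptOf l).length ≤ l.length := by
  cases l with
  | nil => simp [keptOf]
  | cons h t => simpa [keptOf] using Nat.succ_le_succ (scan2_len_le h 1 t)

theorem keptOf_len_eq (l : List Int) : (keptOf l).length = l.length → keptOf l = l := by
  cases l with
  | nil => simp [keptOf]
  | cons h t =>
    intro hl
    simp only [keptOf, List.length_cons] at hl ⊢
    exact congrArg (h :: ·) (scan2_len_eq h 1 t (by omega))

theorem scan2_snoc (prev : Int) (c : Nat) (l : List Int) (x : Int) :
    scan2 prev c (l ++ [x]) =
      ((scan2 prev c l).1 ++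
         (if (if x = (scan2 prev c l).2.1 then (scan2 prev c l).2.2 + 1 else 1) ≤ 2
          then [x] else []),
       x,
       (if x = (scan2 prev c l).2.1 then (scan2 prev c l).2.2 + 1 else 1)) := by
  induction l generalizing prev c with
  | nil =>
    by_cases hx : x = prev <;> simp [scan2, hx]
  | cons y ys ih =>
    by_cases hy : y = prev
    · by_cases hc : c + 1 ≤ 2 <;>
        simp [scan2, hy, hc, ih, List.cons_append]
    · simp [scan2, hy, ih, List.cons_append]

theorem keptOf_snoc (l : List Int) (x : Int) (hl : l ≠ []) :
    keptOf (l ++ [x]) =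
      keptOf l ++ (if (if x = l.getLast hl then cntOf l + 1 else 1) ≤ 2 then [x] else []) := by
  cases l with
  | nil => exact absurd rfl hl
  | cons h t =>
    simp only [keptOf, cntOf, List.cons_append, scan2_snoc]
    rw [scan2_prev]

theorem cntOf_snoc (l : List Int) (x : Int) (hl : l ≠ []) :
    cntOf (l ++ [x]) = (if x = l.getLast hl then cntOf l + 1 else 1) := by
  cases l with
  | nil => exact absurd rfl hl
  | cons h t =>
    simp only [keptOf, cntOf, List.cons_append, scan2_snoc]
    rw [scan2_prev]

-- ns agrees with nums beyond the rewritten prefix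
theorem getD_prefix (nums kept : List Int) (j : Nat)
    (h1 : kept.length ≤ j) (h2 : j < nums.length) :
    (kept ++ nums.drop kept.length).getD j 0 = nums.getD j 0 := by
  rw [List.getD_eq_getElem?_getD, List.getD_eq_getElem?_getD,
      List.getElem?_append_right h1, List.getElem?_drop, Nat.add_sub_cancel' h1]

theorem set_prefix (nums kept : List Int) (v : Int) (h : kept.length < nums.length) :
    (kept ++ nums.drop kept.length).set kept.length v =
      (kept ++ [v]) ++ nums.drop (kept.length + 1) := by
  rw [List.set_append, if_neg (lt_irrefl _), Nat.sub_self,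
      List.drop_eq_getElem_cons h, List.set_cons_zero]
  simp

-- step equation for A's loop body
theorem atwoStep_eq (ns : List Int) (cnt pos : Int) (i : Int) :
    atwoStep (ns, cnt, pos) i =
      if (if PySem.List.pyGetD ns i 0 = PySem.List.pyGetD ns (i - 1) 0 then cnt + 1 else 1) ≤ 2
      then (PySem.List.pySetD ns pos (PySem.List.pyGetD ns i 0),
            (if PySem.List.pyGetD ns i 0 = PySem.List.pyGetD ns (i - 1) 0 then cnt + 1 else 1),
            pos + 1)
      else (ns,
            (if PySem.List.pyGetD ns i 0 = PySem.List.pyGetD ns (i - 1) 0 then cnt + 1 else 1),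
            pos) := rfl

-- the master invariant for A's loop
theorem A_loop (nums : List Int) (hne : nums ≠ []) :
    ∀ m : Nat, 1 ≤ m → m ≤ nums.length →
      (PySem.List.pyRange 1 (m : Int) 1).foldl atwoStep (nums, 1, 1) =
        (keptOf (nums.take m) ++ nums.drop (keptOf (nums.take m)).length,
         ((cntOf (nums.take m) : Int)),
         ((keptOf (nums.take m)).length : Int)) := by
  intro m hm
  induction m, hm using Nat.le_induction with
  | base =>
    intro _
    obtain ⟨h, t, rfl⟩ := List.exists_cons_of_ne_nil hne
    rw [show ((1 : Nat) : Int) = 1 from rfl, PySem.List.pyRange_one_eq_nil le_rfl]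
    simp [keptOf, cntOf, scan2]
  | succ n hn ih =>
    intro hlen
    have hnl : n < nums.length := by omega
    have hml : n - 1 < nums.length := by omega
    have h1n : (1 : Int) ≤ (n : Int) := by exact_mod_cast hn
    rw [show ((n + 1 : Nat) : Int) = (n : Int) + 1 from by push_cast; ring,
        PySem.List.pyRange_one_succ_right h1n, List.foldl_append, ih (by omega),
        List.foldl_cons, List.foldl_nil]
    have htn : (nums.take n).length = n := by rw [List.length_take]; omega
    have hkl_le : (keptOf (nums.take n)).length ≤ n := by
      have h := keptOf_len_le (nums.take n); omega
    have htne : nums.take n ≠ [] := by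
      intro h0; rw [h0] at htn; simp at htn; omega
    have hkplen : (keptOf (nums.take n)).length < nums.length := lt_of_le_of_lt hkl_le hnl
    have htake : nums.take (n + 1) = nums.take n ++ [nums[n]'hnl] := by
      rw [List.take_succ, List.getElem?_eq_getElem hnl]
      simp
    have hlast : (nums.take n).getLast htne = nums[n - 1]'hml := by
      rw [List.getLast_eq_getElem]
      simp only [htn]
      exact List.getElem_take
    -- the two reads see the original values
    have hr1 : PySem.List.pyGetD
        (keptOf (nums.take n) ++ nums.drop (keptOf (nums.take n)).length) ((n : Nat) : Int) 0
        = nums[n]'hnl := by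
      rw [PySem.List.pyGetD_natCast, getD_prefix nums _ n hkl_le hnl,
          List.getD_eq_getElem?_getD, List.getElem?_eq_getElem hnl]
      rfl
    have hr2 : PySem.List.pyGetD
        (keptOf (nums.take n) ++ nums.drop (keptOf (nums.take n)).length) (((n : Nat) : Int) - 1) 0
        = nums[n - 1]'hml := by
      rw [show ((n : Nat) : Int) - 1 = ((n - 1 : Nat) : Int) from by omega,
          PySem.List.pyGetD_natCast]
      have hgd : nums.getD (n - 1) 0 = nums[n - 1]'hml := by
        rw [List.getD_eq_getElem?_getD, List.getElem?_eq_getElem hml]; rfl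
      rcases Nat.lt_or_ge (keptOf (nums.take n)).length n with hlt | hge
      · rw [getD_prefix nums _ (n - 1) (by omega) hml, hgd]
      · have hkeq : keptOf (nums.take n) = nums.take n :=
          keptOf_len_eq (nums.take n) (by omega)
        rw [hkeq, htn, List.take_append_drop, hgd]
    rw [atwoStep_eq, hr1, hr2]
    have hks := keptOf_snoc (nums.take n) (nums[n]'hnl) htne
    have hcs := cntOf_snoc (nums.take n) (nums[n]'hnl) htne
    rw [hlast] at hks hcs
    rw [htake, hks, hcs]
    by_cases hcond : nums[n]'hnl = nums[n - 1]'hml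
    · rw [if_pos hcond, if_pos hcond]
      by_cases hc2 : cntOf (nums.take n) + 1 ≤ 2
      · rw [if_pos hc2, if_pos (show ((cntOf (nums.take n) : Int)) + 1 ≤ 2 from by
          exact_mod_cast hc2)]
        rw [PySem.List.pySetD_natCast, set_prefix nums _ _ hkplen]
        simp only [List.length_append, List.length_cons, List.length_nil]
        refine congrArg₂ Prod.mk ?_ (congrArg₂ Prod.mk (by push_cast <;> ring) (by push_cast <;> ring))
        rfl
      · rw [if_neg hc2, if_neg (show ¬ ((cntOf (nums.take n) : Int)) + 1 ≤ 2 from by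
          intro h; exact hc2 (by exact_mod_cast h))]
        simp only [List.append_nil]
        refine congrArg₂ Prod.mk rfl (congrArg₂ Prod.mk (by push_cast <;> ring) rfl)
    · rw [if_neg hcond, if_neg hcond, if_pos (show (1 : Nat) ≤ 2 from by omega),
          if_pos (show (1 : Int) ≤ 2 from by omega)]
      rw [PySem.List.pySetD_natCast, set_prefix nums _ _ hkplen]
      simp only [List.length_append, List.length_cons, List.length_nil]
      refine congrArg₂ Prod.mk ?_ (congrArg₂ Prod.mk (by push_cast <;> ring) (by push_cast <;> ring))
      rfl

theorem A_char (nums : List Int) (hne : nums ≠ []) :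
    atmost_two nums = (keptOf nums ++ nums.drop (keptOf nums).length,
                       ((keptOf nums).length : Int)) := by
  have hlen : 1 ≤ nums.length := List.length_pos_iff.mpr hne
  unfold atmost_two
  rw [if_neg hne, A_loop nums hne nums.length hlen le_rfl]
  simp

theorem scan2_append (prev : Int) (c : Nat) (a b : List Int) :
    scan2 prev c (a ++ b) =
      ((scan2 prev c a).1 ++ (scan2 (scan2 prev c a).2.1 (scan2 prev c a).2.2 b).1,
       (scan2 (scan2 prev c a).2.1 (scan2 prev c a).2.2 b).2) := by
  induction a generalizing prev c with
  | nil => simp [scan2]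
  | cons y ys ih =>
    by_cases hy : y = prev
    · by_cases hc : c + 1 ≤ 2 <;> simp [scan2, hy, hc, ih, List.cons_append]
    · simp [scan2, hy, ih, List.cons_append]

theorem scan2_const (x : Int) (c : Nat) (w : List Int) (hw : ∀ y ∈ w, y = x) :
    scan2 x c w = (w.take (2 - c), x, c + w.length) := by
  induction w generalizing c with
  | nil => simp [scan2]
  | cons y w' ih =>
    have hyx : y = x := hw y (List.mem_cons_self ..)
    subst hyx
    have hw' : ∀ z ∈ w', z = y := fun z hz => hw z (List.mem_cons_of_mem _ hz)
    by_cases hc : c + 1 ≤ 2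
    · have ht : List.take (2 - c) (y :: w') = y :: List.take (2 - (c + 1)) w' := by
        rw [show 2 - c = (2 - (c + 1)) + 1 from by omega, List.take_succ_cons]
      simp [scan2, ih (c + 1) hw', hc, ht]
      omega
    · have ht : List.take (2 - c) (y :: w') = ([] : List Int) := by
        rw [show 2 - c = 0 from by omega]; rfl
      have ht2 : List.take (2 - (c + 1)) w' = ([] : List Int) := by
        rw [show 2 - (c + 1) = 0 from by omega]; rfl
      simp [scan2, ih (c + 1) hw', hc, ht, ht2]
      omega

theorem scan2_newrun (prev : Int) (c : Nat) (r : List Int)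
    (h : ∀ y ∈ r.head?, y ≠ prev) : (scan2 prev c r).1 = keptOf r := by
  cases r with
  | nil => simp [scan2, keptOf]
  | cons y r' =>
    have hy : y ≠ prev := h y (by simp)
    simp [scan2, keptOf, if_neg hy]

theorem head?_dropWhile_ne (x : Int) (l : List Int) :
    ∀ y ∈ (l.dropWhile (· == x)).head?, y ≠ x := by
  induction l with
  | nil => simp
  | cons a l ih =>
    by_cases ha : a = x
    · simpa [List.dropWhile_cons, ha] using ih
    · simpa [List.dropWhile_cons, ha] using ha

-- B's groupby pass computes keptOf
theorem B_kept (l : List Int) :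
    (pyGroupby l).flatMap (fun g => List.replicate (min 2 g.2.length) g.1) = keptOf l := by
  induction l using pyGroupby.induct with
  | case1 => simp [pyGroupby, keptOf]
  | case2 x xs ih =>
    have hsplit : xs = xs.takeWhile (· == x) ++ xs.dropWhile (· == x) :=
      (List.takeWhile_append_dropWhile).symm
    have hw : ∀ y ∈ xs.takeWhile (· == x), y = x := by
      intro y hy
      simpa using List.mem_takeWhile_imp hy
    rw [pyGroupby, List.flatMap_cons, ih]
    conv_rhs => rw [show (x :: xs) = x :: (xs.takeWhile (· == x) ++ xs.dropWhile (· == x)) from by rw [← hsplit]]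
    rw [keptOf, scan2_append, scan2_const x 1 _ hw,
        scan2_newrun _ _ _ (head?_dropWhile_ne x xs)]
    rcases hwc : xs.takeWhile (· == x) with _ | ⟨z, w'⟩
    · simp
    · have hz : z = x := hw z (by rw [hwc]; exact List.mem_cons_self ..)
      subst hz
      simp [List.replicate_succ]

-- ===== VERDICT (by name: the statement is the Claim_ definition above) =====
theorem atmost_two_spec : Claim_equal_atmost_two := by
  intro nums _ hpre
  unfold Spec_atmost_two
  rw [A_char nums hpre]
  unfold atmost_two_alt
  rw [if_neg hpre, B_kept]
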